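-- pv_equiv track=rewrite | github.com/martin-bartolo/CSCI-LING-5832-SemEval23 | CRF_model.py | make_features
-- ===== SOURCE A (Python) =====
-- from typing import List
--
-- UNK_TOKEN = '<unk>'
--
-- def make_features(text: List[str]) -> List[List[int]]:
--     """Turn a text into a feature vector.
--
--     Args:
--         text (List[str]): List of tokens.
--
--     Returns:
--         List[List[int]]: List of feature Lists.
--     """
--     feature_lists = []
--     for i, token in enumerate(text):
--         feats = []
--         # We add a feature for each unigram.
--         feats.append(f"word={token}")
--
--         # previous word
--         if((i-1) < 0):
--             feats.append(f"prev_word={UNK_TOKEN}")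
--         else:
--             feats.append(f"prev_word={text[i-1]}")
--
--         # next word
--         if((i+1) >= len(text)):
--             feats.append(f"next_word={UNK_TOKEN}")
--         else:
--             feats.append(f"next_word={text[i+1]}")
--         # We append each feature to a List for the token.
--         feature_lists.append(feats)
--     return feature_lists
-- ===== SOURCE B (Python) =====
-- from typing import List
--
-- UNK_TOKEN = '<unk>'
--
-- def make_features(text: List[str]) -> List[List[int]]:
--     padded = [UNK_TOKEN] + list(text) + [UNK_TOKEN]
--     return [[f"word={cur}", f"prev_word={prev}", f"next_word={nxt}"]
--             for prev, cur, nxt in zip(padded, padded[1:], padded[2:])]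
-- ===== Notes on version B (the rewrite author's own statement) =====
-- stated objective: simpler
-- what changed: Replaces A's indexed loop with two boundary if-branches by a sentinel-padded list scanned as a sliding window of three via zip of shifted copies, eliminating all index arithmetic and branching.
import Mathlib
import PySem

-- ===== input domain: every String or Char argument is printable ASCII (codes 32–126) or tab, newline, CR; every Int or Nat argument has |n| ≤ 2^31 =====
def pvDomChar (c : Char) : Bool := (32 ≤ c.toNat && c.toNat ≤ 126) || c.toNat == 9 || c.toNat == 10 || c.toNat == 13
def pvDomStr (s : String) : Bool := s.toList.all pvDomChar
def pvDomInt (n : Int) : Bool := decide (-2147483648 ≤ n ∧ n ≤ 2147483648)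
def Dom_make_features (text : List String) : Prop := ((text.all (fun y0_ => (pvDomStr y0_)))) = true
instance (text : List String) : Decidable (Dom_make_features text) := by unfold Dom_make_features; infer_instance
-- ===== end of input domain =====

-- B replaces A's two boundary `if` branches by a sentinel-padded list scanned with a
-- sliding window of three (simpler decomposition; same O(n) cost).

def UNK_TOKEN : String := "<unk>"

-- ===== PORT A =====
-- A: for i, token in enumerate(text): build [word, prev (guarded), next (guarded)] and append.
def make_features (text : List String) : List (List String) :=
  (PySem.List.enumerate text).foldl
    (fun feature_lists p =>
      let i := p.1
      let token := p.2
      let f1 := "word=" ++ token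
      let f2 := if i - 1 < 0 then "prev_word=" ++ UNK_TOKEN
                else "prev_word=" ++ PySem.List.pyGetD text (i - 1) ""
      let f3 := if i + 1 ≥ (text.length : Int) then "next_word=" ++ UNK_TOKEN
                else "next_word=" ++ PySem.List.pyGetD text (i + 1) ""
      feature_lists ++ [[f1, f2, f3]])
    []

-- ===== PORT B =====
-- B: pad with sentinels, then map over the three aligned shifted copies (zip of padded,
-- padded[1:], padded[2:] as in Source B).
def make_features_alt (text : List String) : List (List String) :=
  let padded := UNK_TOKEN :: (text ++ [UNK_TOKEN])
  ((padded.zip (padded.drop 1)).zip (padded.drop 2)).map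
    (fun w => ["word=" ++ w.1.2, "prev_word=" ++ w.1.1, "next_word=" ++ w.2])

-- ===== PRECONDITION & SPEC =====
def Spec_make_features (text : List String) (out : List (List String)) : Prop := out = make_features_alt text
instance (text : List String) (out : List (List String)) : Decidable (Spec_make_features text out) := by unfold Spec_make_features; infer_instance

-- ===== CLAIM (what is proved, stated in full; the proofs are below) =====
def Claim_equal_make_features : Prop := ∀ (text : List String), Dom_make_features text → Spec_make_features text (make_features text)

-- ===== LEMMAS AND PROOFS =====

theorem length_enumerate {α : Type} (xs : List α) (s : Int) :
    (PySem.List.enumerate xs s).length = xs.length := by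
  induction xs generalizing s with
  | nil => rfl
  | cons x t ih => simp [PySem.List.enumerate, ih]

theorem getElem_enumerate {α : Type} (xs : List α) (s : Int) (i : Nat)
    (h : i < (PySem.List.enumerate xs s).length) :
    (PySem.List.enumerate xs s)[i] =
      (s + i, xs[i]'(by simpa [length_enumerate] using h)) := by
  induction xs generalizing s i with
  | nil => simp [PySem.List.enumerate] at h
  | cons x t ih =>
    cases i with
    | zero => simp [PySem.List.enumerate]
    | succ j =>
      have h' : j < (PySem.List.enumerate t (s + 1)).length := by
        simpa [PySem.List.enumerate] using h
      simp [PySem.List.enumerate, ih]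
      omega

theorem make_features_eq (text : List String) :
    make_features text = make_features_alt text := by
  unfold make_features make_features_alt
  rw [PySem.List.foldl_append_singleton_eq_map
        (fun p : Int × String =>
          ["word=" ++ p.2,
           if p.1 - 1 < 0 then "prev_word=" ++ UNK_TOKEN
           else "prev_word=" ++ PySem.List.pyGetD text (p.1 - 1) "",
           if p.1 + 1 ≥ (text.length : Int) then "next_word=" ++ UNK_TOKEN
           else "next_word=" ++ PySem.List.pyGetD text (p.1 + 1) ""])
        (PySem.List.enumerate text) []]
  simp only [List.nil_append]
  apply List.ext_getElem
  · simp
  · intro i hi1 hi2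
    have hn : i < text.length := by simpa [length_enumerate] using hi1
    simp only [List.getElem_map, List.getElem_zip, List.getElem_drop]
    rw [getElem_enumerate]
    simp only [zero_add]
    have h1 : (UNK_TOKEN :: (text ++ [UNK_TOKEN]))[1 + i]'(by simp; omega) = text[i] := by
      have e : 1 + i = i + 1 := Nat.add_comm 1 i
      simp only [e, List.getElem_cons_succ]
      simp [hn]
    have h0 : (UNK_TOKEN :: (text ++ [UNK_TOKEN]))[i]'(by simp; omega) =
        (if (i : Int) - 1 < 0 then UNK_TOKEN else PySem.List.pyGetD text ((i : Int) - 1) "") := by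
      cases i with
      | zero => simp
      | succ j =>
        have hj : j < text.length := by omega
        have hc : ¬ (((j + 1 : Nat) : Int) - 1 < 0) := by push_cast; omega
        have hcast : ((j + 1 : Nat) : Int) - 1 = ((j : Nat) : Int) := by push_cast; ring
        rw [if_neg hc, hcast, PySem.List.pyGetD_natCast]
        simp [hj, List.getD_eq_getElem?_getD]
    have h2 : (UNK_TOKEN :: (text ++ [UNK_TOKEN]))[2 + i]'(by simp; omega) =
        (if (i : Int) + 1 ≥ (text.length : Int) then UNK_TOKEN
         else PySem.List.pyGetD text ((i : Int) + 1) "") := by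
      have e : 2 + i = (i + 1) + 1 := by omega
      by_cases hlast : i + 1 < text.length
      · have hc : ¬ ((i : Int) + 1 ≥ (text.length : Int)) := by omega
        have hcast : (i : Int) + 1 = ((i + 1 : Nat) : Int) := by push_cast; ring
        rw [if_neg hc, hcast, PySem.List.pyGetD_natCast]
        simp only [e, List.getElem_cons_succ]
        simp [hlast, List.getD_eq_getElem?_getD]
      · have heq : i + 1 = text.length := by omega
        have hc : (i : Int) + 1 ≥ (text.length : Int) := by omega
        rw [if_pos hc]
        simp only [e, List.getElem_cons_succ]
        simp [heq]
    rw [h1, h0, h2]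
    split_ifs <;> rfl

-- ===== VERDICT (by name: the statement is the Claim_ definition above) =====
theorem make_features_spec : Claim_equal_make_features := by
  intro text _
  exact make_features_eq text
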